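-- pv_equiv track=rewrite | github.com/Rodrigoah/HCRA31NEWH-HITACHI-IRDecode | Convert_2_Pulses.py | parse_bin_to_words
-- ===== SOURCE A (Python) =====
-- def parse_bin_to_words(binary):
--     words = []
--     word_lengths = [48, 64, 56]
--     word_number = 0
--     position = 0
--
--     for length in word_lengths:
--         words.append([None] * length)
--
--     for bit in binary[1:]:
--         if bit == 0 or bit == 1:
--             words[word_number][position] = bit
--             position += 1
--         else:
--             word_number += 1
--             position = 0
--
--     return words
-- ===== SOURCE B (Python) =====
-- def parse_bin_to_words(binary):
--     # Locate the separators once, then cut each word directly out of the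
--     # stream as a slice between consecutive separator positions and pad it.
--     tail = binary[1:]
--     seps = [i for i, b in enumerate(tail) if b != 0 and b != 1]
--     bounds = [-1] + seps + [len(tail)]
--     lengths = [48, 64, 56]
--     words = []
--     for k in range(3):
--         seg = tail[bounds[k] + 1:bounds[k + 1]] if k < len(bounds) - 1 else []
--         words.append(seg + [None] * (lengths[k] - len(seg)))
--     return words
-- ===== Notes on version B (the rewrite author's own statement) =====
-- stated objective: alternative
-- what changed: B replaces A's per-bit state machine (word/position counters writing into preallocated None-words) by an index-based method: one enumerate scan records the separator positions, and each of the three words is then reconstructed directly as a slice of the tail between consecutive separator positions, padded with None to 48/64/56.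
import Mathlib
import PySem

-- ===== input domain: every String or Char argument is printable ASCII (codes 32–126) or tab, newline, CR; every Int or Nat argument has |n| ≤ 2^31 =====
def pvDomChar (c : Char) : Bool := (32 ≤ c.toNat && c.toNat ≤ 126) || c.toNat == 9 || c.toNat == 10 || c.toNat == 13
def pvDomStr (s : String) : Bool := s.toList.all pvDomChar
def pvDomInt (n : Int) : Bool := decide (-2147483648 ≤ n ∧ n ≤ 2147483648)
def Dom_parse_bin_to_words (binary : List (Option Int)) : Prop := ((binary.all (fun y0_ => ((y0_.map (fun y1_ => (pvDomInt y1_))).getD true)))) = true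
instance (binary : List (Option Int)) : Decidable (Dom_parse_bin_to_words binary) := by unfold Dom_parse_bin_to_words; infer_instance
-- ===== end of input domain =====

-- B replaces A's per-bit counter state machine by an index method: record the separator
-- positions in one scan, then cut each word out as a slice between consecutive separators
-- and pad it with None (objective: alternative).

-- ===== PORT A =====
-- words[wn][pos] = bit with the IndexError modelled as none
def pvSetAt? {α : Type} (xs : List α) (i : Nat) (a : α) : Option (List α) :=
  if i < xs.length then some (xs.set i a) else none

def pvStepA (st : Option (List (List (Option Int)) × Nat × Nat)) (bit : Option Int) :
    Option (List (List (Option Int)) × Nat × Nat) :=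
  match st with
  | none => none
  | some (ws, wn, pos) =>
    if bit = some 0 ∨ bit = some 1 then
      match ws[wn]? with
      | none => none
      | some w =>
        match pvSetAt? w pos bit with
        | none => none
        | some w' => some (ws.set wn w', wn, pos + 1)
    else some (ws, wn + 1, 0)

def parse_bin_to_words (binary : List (Option Int)) : List (List (Option Int)) :=
  let words := ([48, 64, 56] : List Nat).foldl
    (fun ws l => ws ++ [List.replicate l (none : Option Int)]) []
  match (binary.drop 1).foldl pvStepA (some (words, 0, 0)) with
  | some (ws, _, _) => ws
  | none => []  -- unreachable under Pre_ (Python raises IndexError there)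

-- ===== PORT B =====
-- b != 0 and b != 1  (the separator test)
def pvIsSep (b : Option Int) : Bool := !(b == some 0 || b == some 1)

def parse_bin_to_words_alt (binary : List (Option Int)) : List (List (Option Int)) :=
  let tail := binary.drop 1
  let seps : List Int :=
    ((PySem.List.enumerate tail 0).filter (fun p => pvIsSep p.2)).map (fun p => p.1)
  let bounds : List Int := -1 :: (seps ++ [(tail.length : Int)])
  let lengths : List Nat := [48, 64, 56]
  (List.range 3).foldl (fun words k =>
    let seg := if k < bounds.length - 1 then
        PySem.List.slice tail (some (bounds.getD k 0 + 1)) (some (bounds.getD (k+1) 0))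
      else []
    words ++ [seg ++ List.replicate (lengths.getD k 0 - seg.length) (none : Option Int)]) []

-- ===== PRECONDITION & SPEC =====
-- proof-neutral description of the separator-split of the bit stream (used only by Pre_)
def pvGroups : List (Option Int) → List (List (Option Int))
  | [] => [[]]
  | b :: t =>
    match pvGroups t with
    | [] => [[]]  -- unreachable: pvGroups never returns []
    | g :: gs => if b = some 0 ∨ b = some 1 then (b :: g) :: gs else [] :: g :: gs

-- Pre_ excludes exactly the inputs where A raises IndexError: a group of bits longer than its
-- word (48/64/56), or any bit after the third separator.
def Pre_parse_bin_to_words (binary : List (Option Int)) : Prop :=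
  ((pvGroups (binary.drop 1)).getD 0 []).length ≤ 48 ∧
  ((pvGroups (binary.drop 1)).getD 1 []).length ≤ 64 ∧
  ((pvGroups (binary.drop 1)).getD 2 []).length ≤ 56 ∧
  ∀ g ∈ (pvGroups (binary.drop 1)).drop 3, g = []
instance (binary : List (Option Int)) : Decidable (Pre_parse_bin_to_words binary) := by
  unfold Pre_parse_bin_to_words; infer_instance

def pvWitness_parse_bin_to_words : List (Option Int) := [some 2, some 0, some 1, none, some 1]

def Spec_parse_bin_to_words (binary : List (Option Int)) (out : List (List (Option Int))) : Prop := out = parse_bin_to_words_alt binary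
instance (binary : List (Option Int)) (out : List (List (Option Int))) : Decidable (Spec_parse_bin_to_words binary out) := by unfold Spec_parse_bin_to_words; infer_instance

-- ===== CLAIM (what is proved, stated in full; the proofs are below) =====
def Claim_equal_parse_bin_to_words : Prop := ∀ (binary : List (Option Int)), Dom_parse_bin_to_words binary → Pre_parse_bin_to_words binary → Spec_parse_bin_to_words binary (parse_bin_to_words binary)

-- ===== LEMMAS AND PROOFS =====

lemma pvIsSep_eq (b : Option Int) : pvIsSep b = !decide (b = some 0 ∨ b = some 1) := by
  by_cases h0 : b = some 0 <;> by_cases h1 : b = some 1 <;> simp [pvIsSep, h0, h1]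

-- B-side characterisation -------------------------------------------------

-- the separator indices, recursively
def pvSepI : List (Option Int) → List Int
  | [] => []
  | b :: t => if b = some 0 ∨ b = some 1 then (pvSepI t).map (· + 1)
              else 0 :: (pvSepI t).map (· + 1)

def pvRest (t : List (Option Int)) : List Int := pvSepI t ++ [(t.length : Int)]

-- the loop-body seg expression of the B port, with seps named pvSepI
def pvSeg (t : List (Option Int)) (k : Nat) : List (Option Int) :=
  if k < (pvRest t).length then
    PySem.List.slice t (some ((-1 :: pvRest t).getD k 0 + 1))
      (some ((-1 :: pvRest t).getD (k + 1) 0))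
  else []

def pvPad (g : List (Option Int)) (l : Nat) : List (Option Int) :=
  g ++ List.replicate (l - g.length) (none : Option Int)

lemma map_add_shift (l : List Int) (s : Int) :
    (l.map (· + 1)).map (fun n => s + n) = l.map (fun n => s + 1 + n) := by
  rw [List.map_map]
  exact List.map_congr_left (fun n _ => by simp only [Function.comp_apply]; omega)

lemma pvSeps_eq (t : List (Option Int)) : ∀ (s : Int),
    ((PySem.List.enumerate t s).filter (fun p => pvIsSep p.2)).map (fun p => p.1) =
      (pvSepI t).map (fun n => s + n) := by
  induction t with
  | nil => intro s; simp [PySem.List.enumerate_nil, pvSepI]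
  | cons b t ih =>
    intro s
    rw [PySem.List.enumerate_cons]
    by_cases hb : b = some 0 ∨ b = some 1
    · have hsep : pvIsSep b = false := by simp [pvIsSep_eq, hb]
      rw [List.filter_cons]
      simp only [hsep, Bool.false_eq_true, if_false, pvSepI, if_pos hb]
      rw [ih (s + 1), map_add_shift]
    · have hsep : pvIsSep b = true := by simp [pvIsSep_eq, hb]
      rw [List.filter_cons]
      simp only [hsep, if_true, pvSepI, if_neg hb, List.map_cons]
      rw [ih (s + 1), map_add_shift]
      simp

lemma pvSepI_nonneg (t : List (Option Int)) : ∀ x ∈ pvSepI t, 0 ≤ x := by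
  induction t with
  | nil => simp [pvSepI]
  | cons b t ih =>
    intro x hx
    by_cases hb : b = some 0 ∨ b = some 1
    · simp only [pvSepI, if_pos hb, List.mem_map] at hx
      obtain ⟨y, hy, rfl⟩ := hx
      have := ih y hy; omega
    · simp only [pvSepI, if_neg hb, List.mem_cons, List.mem_map] at hx
      rcases hx with rfl | ⟨y, hy, rfl⟩
      · omega
      · have := ih y hy; omega

lemma pvRest_nonneg (t : List (Option Int)) : ∀ x ∈ pvRest t, 0 ≤ x := by
  intro x hx
  rcases List.mem_append.mp hx with h | h
  · exact pvSepI_nonneg t x h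
  · simp only [List.mem_singleton] at h
    subst h; exact Int.natCast_nonneg _

lemma pvRest_getD_nonneg (t : List (Option Int)) (k : Nat) : 0 ≤ (pvRest t).getD k 0 := by
  rcases h : (pvRest t)[k]? with _ | x
  · simp [List.getD_eq_getElem?_getD, h]
  · have hx : x ∈ pvRest t := List.mem_of_getElem? h
    simpa [List.getD_eq_getElem?_getD, h] using pvRest_nonneg t x hx

lemma pvRest_cons_bit (b : Option Int) (t : List (Option Int)) (hb : b = some 0 ∨ b = some 1) :
    pvRest (b :: t) = (pvRest t).map (· + 1) := by
  simp [pvRest, pvSepI, hb]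

lemma pvRest_cons_sep (b : Option Int) (t : List (Option Int)) (hb : ¬(b = some 0 ∨ b = some 1)) :
    pvRest (b :: t) = 0 :: (pvRest t).map (· + 1) := by
  simp [pvRest, pvSepI, hb]

lemma pvRest_len_pos (t : List (Option Int)) : 0 < (pvRest t).length := by
  simp [pvRest]

lemma getD_map_add_one (l : List Int) (k : Nat) (h : k < l.length) :
    (l.map (· + 1)).getD k 0 = l.getD k 0 + 1 := by
  simp [List.getD_eq_getElem?_getD, List.getElem?_map, List.getElem?_eq_getElem h]

lemma pvGroups_ne_nil (t : List (Option Int)) : pvGroups t ≠ [] := by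
  cases t with
  | nil => simp [pvGroups]
  | cons b t =>
    simp only [pvGroups]
    cases pvGroups t with
    | nil => simp
    | cons g gs => by_cases hb : b = some 0 ∨ b = some 1 <;> simp [hb]

lemma pvGroups_length (t : List (Option Int)) : (pvGroups t).length = (pvRest t).length := by
  induction t with
  | nil => simp [pvGroups, pvRest, pvSepI]
  | cons b t ih =>
    by_cases hb : b = some 0 ∨ b = some 1
    · rw [pvRest_cons_bit b t hb]
      cases hg : pvGroups t with
      | nil => exact absurd hg (pvGroups_ne_nil t)
      | cons g gs =>
        simp only [pvGroups, hg, if_pos hb, List.length_cons, List.length_map]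
        rw [hg] at ih; simpa using ih
    · rw [pvRest_cons_sep b t hb]
      cases hg : pvGroups t with
      | nil => exact absurd hg (pvGroups_ne_nil t)
      | cons g gs =>
        simp only [pvGroups, hg, if_neg hb, List.length_cons, List.length_map]
        rw [hg] at ih; simpa using ih

lemma slice_shift (b : Option Int) (t : List (Option Int)) (x y : Int)
    (hx : 0 ≤ x) (hy : 0 ≤ y) :
    PySem.List.slice (b :: t) (some (x + 1)) (some (y + 1)) =
      PySem.List.slice t (some x) (some y) := by
  rw [PySem.List.slice_toNat _ (by omega) (by omega), PySem.List.slice_toNat _ hx hy]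
  have hx1 : (x + 1).toNat = x.toNat + 1 := by omega
  have hy1 : (y + 1).toNat = y.toNat + 1 := by omega
  rw [hx1, hy1, List.drop_succ_cons]
  congr 1
  omega

lemma slice_zero_take (t : List (Option Int)) (m : Int) (hm : 0 ≤ m) :
    PySem.List.slice t (some 0) (some m) = t.take m.toNat := by
  rw [PySem.List.slice_toNat _ le_rfl hm]; simp

lemma pvSeg_eq (t : List (Option Int)) : ∀ (k : Nat),
    pvSeg t k = (pvGroups t).getD k [] := by
  induction t with
  | nil =>
    intro k
    cases k with
    | zero => decide
    | succ k =>
      have hk : ¬(k + 1 < (pvRest ([] : List (Option Int))).length) := by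
        simp [pvRest, pvSepI]
      simp only [pvSeg]
      rw [if_neg hk]
      simp [pvGroups]
  | cons b t ih =>
    intro k
    by_cases hk : k < (pvRest (b :: t)).length
    · by_cases hb : b = some 0 ∨ b = some 1
      · -- bit case
        cases hg : pvGroups t with
        | nil => exact absurd hg (pvGroups_ne_nil t)
        | cons g gs =>
          have hlen0 : 0 < (pvRest t).length := pvRest_len_pos t
          cases k with
          | zero =>
            have hm := pvRest_getD_nonneg t 0
            simp only [pvSeg]
            rw [if_pos hk]
            simp only [List.getD_cons_zero, List.getD_cons_succ]
            rw [pvRest_cons_bit b t hb, getD_map_add_one _ _ hlen0]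
            rw [show (-1 : Int) + 1 = 0 by ring, slice_zero_take _ _ (by omega)]
            have htn : ((pvRest t).getD 0 0 + 1).toNat = ((pvRest t).getD 0 0).toNat + 1 := by
              omega
            rw [htn, List.take_succ_cons]
            have ih0 := ih 0
            simp only [pvSeg] at ih0
            rw [if_pos hlen0] at ih0
            simp only [List.getD_cons_zero, List.getD_cons_succ] at ih0
            rw [show (-1 : Int) + 1 = 0 by ring, slice_zero_take _ _ hm] at ih0
            rw [ih0, hg]
            simp [pvGroups, hg, hb]
          | succ k =>
            rw [pvRest_cons_bit b t hb] at hk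
            have hk1 : k + 1 < (pvRest t).length := by simpa using hk
            have hk0 : k < (pvRest t).length := by omega
            have hx := pvRest_getD_nonneg t k
            have hy := pvRest_getD_nonneg t (k + 1)
            simp only [pvSeg]
            rw [if_pos (by rw [pvRest_cons_bit b t hb]; simpa using hk1)]
            simp only [List.getD_cons_succ]
            rw [pvRest_cons_bit b t hb, getD_map_add_one _ _ hk0, getD_map_add_one _ _ hk1]
            rw [show (pvRest t).getD k 0 + 1 + 1 = ((pvRest t).getD k 0 + 1) + 1 by ring,
                slice_shift b t _ _ (by omega) hy]
            have ht := ih (k + 1)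
            simp only [pvSeg] at ht
            rw [if_pos hk1] at ht
            simp only [List.getD_cons_succ] at ht
            rw [ht, hg]
            simp [pvGroups, hg, hb]
      · -- separator case
        cases hg : pvGroups t with
        | nil => exact absurd hg (pvGroups_ne_nil t)
        | cons g gs =>
          cases k with
          | zero =>
            simp only [pvSeg]
            rw [if_pos hk]
            simp only [List.getD_cons_zero, List.getD_cons_succ]
            rw [pvRest_cons_sep b t hb]
            simp only [List.getD_cons_zero]
            rw [show (-1 : Int) + 1 = 0 by ring, slice_zero_take _ _ le_rfl]
            simp [pvGroups, hg, hb]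
          | succ k =>
            rw [pvRest_cons_sep b t hb] at hk
            have hklen : k < (pvRest t).length := by simpa using hk
            simp only [pvSeg]
            rw [if_pos (by rw [pvRest_cons_sep b t hb]; simpa using hk)]
            simp only [List.getD_cons_succ]
            rw [pvRest_cons_sep b t hb]
            cases k with
            | zero =>
              have hm := pvRest_getD_nonneg t 0
              simp only [List.getD_cons_zero, List.getD_cons_succ]
              rw [getD_map_add_one _ _ hklen]
              rw [show (0 : Int) + 1 = 0 + 1 by ring, slice_shift b t 0 _ le_rfl hm]
              have ih0 := ih 0
              simp only [pvSeg] at ih0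
              rw [if_pos hklen] at ih0
              simp only [List.getD_cons_zero, List.getD_cons_succ] at ih0
              rw [show (-1 : Int) + 1 = 0 by ring] at ih0
              rw [ih0, hg]
              simp [pvGroups, hg, hb]
            | succ j =>
              have hj1 : j + 1 < (pvRest t).length := hklen
              have hj0 : j < (pvRest t).length := by omega
              have hx := pvRest_getD_nonneg t j
              have hy := pvRest_getD_nonneg t (j + 1)
              simp only [List.getD_cons_succ]
              rw [getD_map_add_one _ _ hj0, getD_map_add_one _ _ hj1]
              rw [show (pvRest t).getD j 0 + 1 + 1 = ((pvRest t).getD j 0 + 1) + 1 by ring,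
                  slice_shift b t _ _ (by omega) hy]
              have ht := ih (j + 1)
              simp only [pvSeg] at ht
              rw [if_pos hj1] at ht
              simp only [List.getD_cons_succ] at ht
              rw [ht, hg]
              simp [pvGroups, hg, hb]
    · -- out of range: both sides are []
      have h2 : (pvGroups (b :: t)).length ≤ k := by rw [pvGroups_length]; omega
      simp only [pvSeg]
      rw [if_neg hk, List.getD_eq_getElem?_getD, List.getElem?_eq_none h2]
      rfl

-- B's port, rewritten as padded segments
lemma alt_eq (binary : List (Option Int)) :
    parse_bin_to_words_alt binary =
      [pvPad (pvSeg (binary.drop 1) 0) 48, pvPad (pvSeg (binary.drop 1) 1) 64,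
       pvPad (pvSeg (binary.drop 1) 2) 56] := by
  unfold parse_bin_to_words_alt pvSeg pvRest pvPad
  dsimp only
  rw [pvSeps_eq (binary.drop 1) 0]
  simp only [show List.range 3 = [0, 1, 2] from rfl, List.foldl_cons, List.foldl_nil,
    List.nil_append, List.cons_append, List.length_cons, List.length_append,
    List.length_map, List.length_singleton, Nat.add_sub_cancel, zero_add,
    List.getD_cons_zero, List.getD_cons_succ]
  simp [zero_add]

-- A-side characterisation -------------------------------------------------

def pvFillGroup (ws : List (List (Option Int))) (wn pos : Nat) :
    List (Option Int) → Option (List (List (Option Int)) × Nat)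
  | [] => some (ws, pos)
  | b :: g =>
    match ws[wn]? with
    | none => none
    | some w =>
      match pvSetAt? w pos b with
      | none => none
      | some w' => pvFillGroup (ws.set wn w') wn (pos + 1) g

def pvFillWords (ws : List (List (Option Int))) (wn pos : Nat) :
    List (List (Option Int)) → Option (List (List (Option Int)))
  | [] => some ws
  | g :: gs =>
    match pvFillGroup ws wn pos g with
    | none => none
    | some (ws', _) => pvFillWords ws' (wn + 1) 0 gs

lemma foldl_stepA_none (t : List (Option Int)) : t.foldl pvStepA none = none := by
  induction t with
  | nil => rfl
  | cons b t ih => simpa [pvStepA] using ih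

lemma foldl_stepA_eq (t : List (Option Int)) :
    ∀ ws wn pos,
    (t.foldl pvStepA (some (ws, wn, pos))).map (fun s => s.1) =
      pvFillWords ws wn pos (pvGroups t) := by
  induction t with
  | nil => intro ws wn pos; simp [pvGroups, pvFillWords, pvFillGroup]
  | cons b t ih =>
    intro ws wn pos
    simp only [List.foldl_cons, pvGroups]
    by_cases hb : b = some 0 ∨ b = some 1
    · cases hg : pvGroups t with
      | nil => exact absurd hg (pvGroups_ne_nil t)
      | cons g gs =>
        simp only [pvStepA, if_pos hb]
        cases hw : ws[wn]? with
        | none =>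
          simp [pvFillWords, pvFillGroup, hw, foldl_stepA_none]
        | some w =>
          cases hs : pvSetAt? w pos b with
          | none => simp [pvFillWords, pvFillGroup, hw, hs, foldl_stepA_none]
          | some w' =>
            simp only [hs]
            rw [ih (ws.set wn w') wn (pos + 1)]
            rw [hg]
            simp [pvFillWords, pvFillGroup, hw, hs]
    · simp only [pvStepA, if_neg hb]
      rw [ih ws (wn + 1) 0]
      cases hg : pvGroups t with
      | nil => exact absurd hg (pvGroups_ne_nil t)
      | cons g gs => simp [pvFillWords, pvFillGroup]

-- sequential in-place writes
def pvSetSeq (w : List (Option Int)) (pos : Nat) : List (Option Int) → List (Option Int)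
  | [] => w
  | b :: g => pvSetSeq (w.set pos b) (pos + 1) g

lemma pvFillGroup_ok (g : List (Option Int)) :
    ∀ ws wn pos w, ws[wn]? = some w → pos + g.length ≤ w.length →
    pvFillGroup ws wn pos g = some (ws.set wn (pvSetSeq w pos g), pos + g.length) := by
  induction g with
  | nil =>
    intro ws wn pos w hw _
    have hwn : wn < ws.length := (List.getElem?_eq_some_iff.mp hw).1
    have : ws[wn] = w := by simpa [List.getElem?_eq_getElem hwn] using hw
    simp [pvFillGroup, pvSetSeq, ← this, List.set_getElem_self]
  | cons b g ih =>
    intro ws wn pos w hw hlen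
    have hwn : wn < ws.length := (List.getElem?_eq_some_iff.mp hw).1
    have hpos : pos < w.length := by simp at hlen; omega
    simp only [pvFillGroup, hw, pvSetAt?, if_pos hpos]
    have hget : (ws.set wn (w.set pos b))[wn]? = some (w.set pos b) := by
      simp [hwn]
    have hlen' : pos + 1 + g.length ≤ (w.set pos b).length := by
      simp at hlen ⊢; omega
    rw [ih (ws.set wn (w.set pos b)) wn (pos + 1) (w.set pos b) hget hlen']
    simp [pvSetSeq, List.set_set]
    omega

lemma pvSetSeq_append (g : List (Option Int)) :
    ∀ (done rest : List (Option Int)), g.length ≤ rest.length →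
    pvSetSeq (done ++ rest) done.length g = done ++ g ++ rest.drop g.length := by
  induction g with
  | nil => intro done rest _; simp [pvSetSeq]
  | cons b g ih =>
    intro done rest h
    cases rest with
    | nil => simp at h
    | cons r0 rest' =>
      simp only [pvSetSeq]
      have hset : (done ++ r0 :: rest').set done.length b = (done ++ [b]) ++ rest' := by
        rw [List.set_append_right _ _ (le_refl _)]
        simp
      have hlen : done.length + 1 = (done ++ [b]).length := by simp
      rw [hset, hlen, ih (done ++ [b]) rest' (by simp at h; omega)]
      simp

lemma pvSetSeq_replicate (g : List (Option Int)) (l : Nat) (h : g.length ≤ l) :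
    pvSetSeq (List.replicate l (none : Option Int)) 0 g = pvPad g l := by
  have := pvSetSeq_append g [] (List.replicate l none) (by simpa using h)
  simpa [pvPad, List.drop_replicate] using this

lemma pvFillWords_empties (gs : List (List (Option Int))) :
    ∀ ws wn pos, (∀ g ∈ gs, g = []) → pvFillWords ws wn pos gs = some ws := by
  induction gs with
  | nil => intro ws wn pos _; rfl
  | cons g gs ih =>
    intro ws wn pos h
    have hg : g = [] := h g (by simp)
    subst hg
    simp only [pvFillWords, pvFillGroup]
    exact ih ws (wn + 1) 0 (fun g hg => h g (by simp [hg]))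

-- ===== VERDICT (by name: the statement is the Claim_ definition above) =====
theorem parse_bin_to_words_spec : Claim_equal_parse_bin_to_words := by
  intro binary _ hpre
  unfold Spec_parse_bin_to_words parse_bin_to_words
  obtain ⟨h0, h1, h2, h3⟩ := hpre
  rw [alt_eq, pvSeg_eq, pvSeg_eq, pvSeg_eq]
  set t := binary.drop 1 with ht
  have hmap := foldl_stepA_eq t
    [List.replicate 48 (none : Option Int), List.replicate 64 none, List.replicate 56 none] 0 0
  cases hg : pvGroups t with
  | nil => exact absurd hg (pvGroups_ne_nil t)
  | cons g0 gs0 =>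
    rw [hg] at hmap
    have hfill : pvFillWords
        [List.replicate 48 (none : Option Int), List.replicate 64 none, List.replicate 56 none]
        0 0 (g0 :: gs0) =
        some [pvPad ((g0 :: gs0).getD 0 []) 48, pvPad ((g0 :: gs0).getD 1 []) 64,
              pvPad ((g0 :: gs0).getD 2 []) 56] := by
      rw [hg] at h0 h1 h2 h3
      simp only [List.getD_cons_zero] at h0
      simp only [pvFillWords]
      rw [pvFillGroup_ok g0 _ 0 0 (List.replicate 48 none) (by simp) (by simpa using h0)]
      rw [pvSetSeq_replicate g0 48 h0]
      cases gs0 with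
      | nil => simp [pvFillWords, pvPad]
      | cons g1 gs1 =>
        simp only [List.getD_cons_succ, List.getD_cons_zero] at h1
        simp only [pvFillWords]
        rw [pvFillGroup_ok g1 _ 1 0 (List.replicate 64 none) (by simp) (by simpa using h1)]
        rw [pvSetSeq_replicate g1 64 h1]
        cases gs1 with
        | nil => simp [pvFillWords, pvPad]
        | cons g2 gs2 =>
          simp only [List.getD_cons_succ, List.getD_cons_zero] at h2
          simp only [pvFillWords]
          rw [pvFillGroup_ok g2 _ 2 0 (List.replicate 56 none) (by simp) (by simpa using h2)]
          rw [pvSetSeq_replicate g2 56 h2]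
          have hemp : ∀ ws wn pos, pvFillWords ws wn pos gs2 = some ws :=
            fun ws wn pos => pvFillWords_empties gs2 ws wn pos
              (fun g hgm => h3 g (by simp [hgm]))
          simp [hemp, List.set]
    rw [hfill] at hmap
    cases hres : t.foldl pvStepA
        (some ([List.replicate 48 (none : Option Int), List.replicate 64 none,
                List.replicate 56 none], 0, 0)) with
    | none => rw [hres] at hmap; simp at hmap
    | some s =>
      rw [hres] at hmap
      simp only [Option.map_some, Option.some.injEq] at hmap
      simp only [List.foldl_cons, List.foldl_nil, List.nil_append, List.cons_append]
      rw [hres]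
      exact hmap
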